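-- pv_equiv track=rewrite | github.com/afrakhancs50/Time-Table-Generator | project.py | generate_tt1
-- ===== SOURCE A (Python) =====
-- def generate_tt1(subject):
--     tt1 = []
--     mon = []
--     tue = []
--     wed = []
--     thu = []
--     fri = []
--
--     for row in range(5):
--         for col in range(6):
--             if row == 0:
--                 if row == col or col == row + 1:
--                     mon.append(subject[row])
--                 else:
--                     mon.append(subject[col - 1])
--             elif row == 1:
--                 if row == col or col == row + 1:
--                     tue.append(subject[row])
--                 elif col > row:
--                     tue.append(subject[col-1])
--                 else:
--                     tue.append(subject[col])
--             elif row == 2: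
--                 if row == col or col == row + 1:
--                     wed.append(subject[row])
--                 elif col > row:
--                     wed.append(subject[col-1])
--                 else:
--                     wed.append(subject[col])
--             elif row == 3:
--                 if row == col or col == row + 1:
--                     thu.append(subject[row])
--                 elif col > row:
--                     thu.append(subject[col-1])
--                 else:
--                     thu.append(subject[col])
--             elif row == 4:
--                 if row == col or col == row + 1:
--                     fri.append(subject[row])
--                 elif col > row:
--                     fri.append(subject[col-1])
--                 else:
--                     fri.append(subject[col])
--         if row == 0:
--             tt1.append(mon)
--         elif row == 1:
--             tt1.append(tue)
--         elif row == 2: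
--             tt1.append(wed)
--         elif row == 3:
--             tt1.append(thu)
--         elif row == 4:
--             tt1.append(fri)
--     return tt1
-- ===== SOURCE B (Python) =====
-- def generate_tt1(subject):
--     base = [subject[0], subject[1], subject[2], subject[3], subject[4]]
--     return [base[:d] + [base[d], base[d]] + base[d + 1:] for d in range(5)]
-- ===== Notes on version B (the rewrite author's own statement) =====
-- stated objective: simpler
-- what changed: Replaces the 5x6 per-cell row/col conditional cascade with a row-at-a-time construction: each day is the five subjects with subject[d] duplicated, built via slices of a base list.
import Mathlib
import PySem

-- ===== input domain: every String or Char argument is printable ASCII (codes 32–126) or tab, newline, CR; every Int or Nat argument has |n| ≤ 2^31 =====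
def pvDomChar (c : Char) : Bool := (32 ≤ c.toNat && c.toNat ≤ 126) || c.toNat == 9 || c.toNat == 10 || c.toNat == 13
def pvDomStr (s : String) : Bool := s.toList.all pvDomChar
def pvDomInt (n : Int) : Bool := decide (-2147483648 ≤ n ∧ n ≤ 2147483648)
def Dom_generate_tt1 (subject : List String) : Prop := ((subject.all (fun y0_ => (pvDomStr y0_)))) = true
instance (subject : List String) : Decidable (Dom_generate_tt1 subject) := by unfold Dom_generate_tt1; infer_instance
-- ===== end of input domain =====

-- B builds each day row at a time (the five subjects with subject[d] duplicated, via slices)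
-- instead of A's 5x6 per-cell row/col conditional cascade; objective: simpler.

-- ===== PORT A =====
-- subject[i] under Pre_ (5 ≤ length, indices used are 0..4): total form pyGetD
def pvGetS (subject : List String) (i : Int) : String := PySem.List.pyGetD subject i ""

-- state: (tt1, mon, tue, wed, thu, fri)
def pvStateA := List (List String) × List String × List String × List String × List String × List String

def generate_tt1 (subject : List String) : List (List String) :=
  let final : pvStateA :=
    (PySem.List.pyRange 0 5 1).foldl (fun st row =>
      let st' : pvStateA :=
        (PySem.List.pyRange 0 6 1).foldl (fun st2 col =>
          let (tt1, mon, tue, wed, thu, fri) := st2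
          if row == 0 then
            if row == col || col == row + 1 then (tt1, mon ++ [pvGetS subject row], tue, wed, thu, fri)
            else (tt1, mon ++ [pvGetS subject (col - 1)], tue, wed, thu, fri)
          else if row == 1 then
            if row == col || col == row + 1 then (tt1, mon, tue ++ [pvGetS subject row], wed, thu, fri)
            else if col > row then (tt1, mon, tue ++ [pvGetS subject (col - 1)], wed, thu, fri)
            else (tt1, mon, tue ++ [pvGetS subject col], wed, thu, fri)
          else if row == 2 then
            if row == col || col == row + 1 then (tt1, mon, tue, wed ++ [pvGetS subject row], thu, fri)
            else if col > row then (tt1, mon, tue, wed ++ [pvGetS subject (col - 1)], thu, fri)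
            else (tt1, mon, tue, wed ++ [pvGetS subject col], thu, fri)
          else if row == 3 then
            if row == col || col == row + 1 then (tt1, mon, tue, wed, thu ++ [pvGetS subject row], fri)
            else if col > row then (tt1, mon, tue, wed, thu ++ [pvGetS subject (col - 1)], fri)
            else (tt1, mon, tue, wed, thu ++ [pvGetS subject col], fri)
          else if row == 4 then
            if row == col || col == row + 1 then (tt1, mon, tue, wed, thu, fri ++ [pvGetS subject row])
            else if col > row then (tt1, mon, tue, wed, thu, fri ++ [pvGetS subject (col - 1)])
            else (tt1, mon, tue, wed, thu, fri ++ [pvGetS subject col])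
          else st2) st
      let (tt1, mon, tue, wed, thu, fri) := st'
      if row == 0 then (tt1 ++ [mon], mon, tue, wed, thu, fri)
      else if row == 1 then (tt1 ++ [tue], mon, tue, wed, thu, fri)
      else if row == 2 then (tt1 ++ [wed], mon, tue, wed, thu, fri)
      else if row == 3 then (tt1 ++ [thu], mon, tue, wed, thu, fri)
      else if row == 4 then (tt1 ++ [fri], mon, tue, wed, thu, fri)
      else st') (([], [], [], [], [], []) : pvStateA)
  final.1

-- ===== PORT B =====
def generate_tt1_alt (subject : List String) : List (List String) :=
  let base : List String :=
    [pvGetS subject 0, pvGetS subject 1, pvGetS subject 2, pvGetS subject 3, pvGetS subject 4]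
  (PySem.List.pyRange 0 5 1).map (fun d =>
    PySem.List.slice base none (some d)
      ++ [PySem.List.pyGetD base d "", PySem.List.pyGetD base d ""]
      ++ PySem.List.slice base (some (d + 1)) none)

-- ===== PRECONDITION & SPEC =====
-- excludes lists with fewer than 5 subjects, on which both Pythons raise IndexError
def Pre_generate_tt1 (subject : List String) : Prop := 5 ≤ subject.length
instance (subject : List String) : Decidable (Pre_generate_tt1 subject) := by unfold Pre_generate_tt1; infer_instance
def pvWitness_generate_tt1 : List String := ["ml", "os", "db", "ai", "net"]

def Spec_generate_tt1 (subject : List String) (out : List (List String)) : Prop := out = generate_tt1_alt subject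
instance (subject : List String) (out : List (List String)) : Decidable (Spec_generate_tt1 subject out) := by unfold Spec_generate_tt1; infer_instance

-- ===== CLAIM (what is proved, stated in full; the proofs are below) =====
def Claim_equal_generate_tt1 : Prop := ∀ (subject : List String), Dom_generate_tt1 subject → Pre_generate_tt1 subject → Spec_generate_tt1 subject (generate_tt1 subject)

-- ===== LEMMAS AND PROOFS =====

-- ===== VERDICT (by name: the statement is the Claim_ definition above) =====
theorem generate_tt1_spec : Claim_equal_generate_tt1 := by
  intro subject _ hpre
  unfold Spec_generate_tt1
  unfold Pre_generate_tt1 at hpre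
  match subject with
  | a :: b :: c :: d :: e :: t => rfl
  | [] => simp at hpre
  | [_] => simp at hpre
  | [_, _] => simp at hpre
  | [_, _, _] => simp at hpre
  | [_, _, _, _] => simp at hpre
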